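-- pv_equiv track=rewrite | github.com/ryanjosebrosas/opencode-hive-archon | backend/src/second_brain/orchestration/retrieval_router.py | select_route
-- ===== SOURCE A (Python) =====
-- from typing import Literal
--
-- def _is_provider_eligible(
--     provider: str,
--     enabled_providers: list[str],
--     provider_status: dict[str, str],
-- ) -> bool:
--     """
--     Check if provider is eligible for selection.
--
--     Provider is eligible when:
--     1. Provider is in enabled_providers list
--     2. Provider status is available or degraded (not unavailable)
--
--     Args:
--         provider: Provider name to check
--         enabled_providers: List of enabled provider names
--         provider_status: Normalized provider status snapshot
--
--     Returns:
--         True if provider is eligible, False otherwise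
--     """
--     if provider not in enabled_providers:
--         return False
--
--     status = provider_status.get(provider, ProviderStatus.UNAVAILABLE)
--     return status in [ProviderStatus.AVAILABLE, ProviderStatus.DEGRADED]
--
-- class ProviderStatus:
--     """Provider availability status."""
--     AVAILABLE = "available"
--     UNAVAILABLE = "unavailable"
--     DEGRADED = "degraded"
--
-- def select_route(
--     mode: Literal["fast", "accurate", "conversation"],
--     available_providers: list[str],
--     provider_status: dict[str, str]
-- ) -> tuple[str, dict]:
--     """
--     Select provider and route options deterministically.
--
--     Returns:
--         Tuple of (provider_name, route_options)
--         route_options includes skip_external_rerank flag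
--     """
--     if not available_providers:
--         return "none", {"skip_external_rerank": False}
--
--     # Mode-based selection
--     if mode == "conversation":
--         # Prefer Mem0 for conversation mode
--         if "mem0" in available_providers and _is_provider_eligible("mem0", available_providers, provider_status):
--             status = provider_status.get("mem0", ProviderStatus.AVAILABLE)
--             if status == ProviderStatus.AVAILABLE:
--                 return "mem0", {"skip_external_rerank": True}  # Mem0 policy
--         if "supabase" in available_providers and _is_provider_eligible("supabase", available_providers, provider_status):
--             status = provider_status.get("supabase", ProviderStatus.AVAILABLE)
--             if status == ProviderStatus.AVAILABLE:
--                 return "supabase", {"skip_external_rerank": False}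
--
--     elif mode == "fast":
--         # Single best available provider
--         for provider in ["mem0", "supabase", "graphiti"]:
--             if provider in available_providers and _is_provider_eligible(provider, available_providers, provider_status):
--                 status = provider_status.get(provider, ProviderStatus.AVAILABLE)
--                 if status == ProviderStatus.AVAILABLE:
--                     skip_rerank = provider == "mem0"
--                     return provider, {"skip_external_rerank": skip_rerank}
--
--     elif mode == "accurate":
--         # Multi-provider merge (simplified: first available)
--         for provider in available_providers:
--             if _is_provider_eligible(provider, available_providers, provider_status):
--                 status = provider_status.get(provider, ProviderStatus.AVAILABLE)
--                 if status == ProviderStatus.AVAILABLE: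
--                     skip_rerank = provider == "mem0"
--                     return provider, {"skip_external_rerank": skip_rerank}
--
--     # Fallback to first available (includes degraded)
--     for provider in available_providers:
--         if _is_provider_eligible(provider, available_providers, provider_status):
--             skip_rerank = provider == "mem0"
--             return provider, {"skip_external_rerank": skip_rerank}
--
--     return "none", {"skip_external_rerank": False}
-- ===== SOURCE B (Python) =====
-- def select_route(mode, available_providers, provider_status):
--     # Single pass: score every provider with a lexicographic priority key
--     # (phase, rank) and return the argmin; no staged scans.
--     order = {"conversation": ["mem0", "supabase"],
--              "fast": ["mem0", "supabase", "graphiti"],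
--              "accurate": available_providers}.get(mode, [])
--     best_key = best = None
--     for i, p in enumerate(available_providers):
--         s = provider_status.get(p)
--         if s == "available" or s == "degraded":
--             key = (0, order.index(p)) if (s == "available" and p in order) else (1, i)
--             if best_key is None or key < best_key:
--                 best_key, best = key, p
--     if best is None:
--         return "none", {"skip_external_rerank": False}
--     return best, {"skip_external_rerank": best == "mem0"}
-- ===== Notes on version B (the rewrite author's own statement) =====
-- stated objective: alternative
-- what changed: Replaces A's staged mode-branch scan plus degraded-fallback scan by a single enumerate pass that assigns every eligible provider a lexicographic priority key (0, mode-candidate rank) or (1, position) and returns the argmin; the _is_provider_eligible helper and the two-phase control flow disappear.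
import Mathlib
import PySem

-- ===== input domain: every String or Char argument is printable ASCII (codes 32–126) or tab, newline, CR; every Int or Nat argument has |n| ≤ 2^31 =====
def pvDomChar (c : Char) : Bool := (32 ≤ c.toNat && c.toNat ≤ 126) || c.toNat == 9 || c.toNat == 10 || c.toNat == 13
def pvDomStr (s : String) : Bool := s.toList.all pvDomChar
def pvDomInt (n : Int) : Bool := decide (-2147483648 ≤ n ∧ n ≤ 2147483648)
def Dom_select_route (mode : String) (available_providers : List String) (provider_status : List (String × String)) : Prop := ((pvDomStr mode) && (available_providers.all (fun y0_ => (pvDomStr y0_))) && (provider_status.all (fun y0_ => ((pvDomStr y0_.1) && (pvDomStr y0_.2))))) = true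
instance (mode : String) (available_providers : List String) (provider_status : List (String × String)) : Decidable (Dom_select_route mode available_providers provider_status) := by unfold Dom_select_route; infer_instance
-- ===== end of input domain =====

-- B replaces A's staged mode-branch scan and degraded-fallback scan by a single pass that
-- scores every provider with a lexicographic priority key and returns the argmin (objective: alternative).

-- ===== PORT A =====
-- _is_provider_eligible
def pvEligible (provider : String) (enabled_providers : List String) (provider_status : List (String × String)) : Bool :=
  if !(enabled_providers.contains provider) then false
  else (["available", "degraded"]).contains ((PySem.Dict.mk provider_status).getD provider "unavailable")

-- the 'fast'/'accurate' loops of A (same body; 'accurate' omits the explicit 'in available_providers' test)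
def pvLoopFast (available_providers : List String) (provider_status : List (String × String)) : List String → Option (String × List (String × Bool))
  | [] => none
  | p :: rest =>
    if available_providers.contains p && pvEligible p available_providers provider_status &&
        ((PySem.Dict.mk provider_status).getD p "available" == "available") then
      some (p, [("skip_external_rerank", p == "mem0")])
    else pvLoopFast available_providers provider_status rest

def pvLoopAcc (available_providers : List String) (provider_status : List (String × String)) : List String → Option (String × List (String × Bool))
  | [] => none
  | p :: rest =>
    if pvEligible p available_providers provider_status &&
        ((PySem.Dict.mk provider_status).getD p "available" == "available") then
      some (p, [("skip_external_rerank", p == "mem0")])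
    else pvLoopAcc available_providers provider_status rest

-- A's final fallback loop
def pvLoopFb (available_providers : List String) (provider_status : List (String × String)) : List String → Option (String × List (String × Bool))
  | [] => none
  | p :: rest =>
    if pvEligible p available_providers provider_status then
      some (p, [("skip_external_rerank", p == "mem0")])
    else pvLoopFb available_providers provider_status rest

def select_route (mode : String) (available_providers : List String) (provider_status : List (String × String)) : String × (List (String × Bool)) :=
  if available_providers.isEmpty then ("none", [("skip_external_rerank", false)])
  else
    let phase1 : Option (String × List (String × Bool)) :=
      if mode == "conversation" then
        -- A's two sequential ifs ("if in ∧ eligible: if status == available: return …"), flattened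
        if available_providers.contains "mem0" && pvEligible "mem0" available_providers provider_status &&
            ((PySem.Dict.mk provider_status).getD "mem0" "available" == "available") then
          some ("mem0", [("skip_external_rerank", true)])
        else if available_providers.contains "supabase" && pvEligible "supabase" available_providers provider_status &&
            ((PySem.Dict.mk provider_status).getD "supabase" "available" == "available") then
          some ("supabase", [("skip_external_rerank", false)])
        else none
      else if mode == "fast" then
        pvLoopFast available_providers provider_status ["mem0", "supabase", "graphiti"]
      else if mode == "accurate" then
        pvLoopAcc available_providers provider_status available_providers
      else none
    match phase1 with
    | some r => r
    | none =>
      match pvLoopFb available_providers provider_status available_providers with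
      | some r => r
      | none => ("none", [("skip_external_rerank", false)])

-- ===== PORT B =====
-- the mode → candidate-order table ({...}.get(mode, []))
def pvOrder (mode : String) (available_providers : List String) : List String :=
  (PySem.Dict.mk [("conversation", ["mem0", "supabase"]),
                  ("fast", ["mem0", "supabase", "graphiti"]),
                  ("accurate", available_providers)]).getD mode []

-- Python tuple `<` on (int, int) priority keys (lexicographic)
def pvKeyLt (a b : Nat × Nat) : Bool := decide (a.1 < b.1 ∨ (a.1 = b.1 ∧ a.2 < b.2))

-- `if best_key is None or key < best_key: best_key, best = key, p`
def pvTake (best : Option ((Nat × Nat) × String)) (kp : (Nat × Nat) × String) : Option ((Nat × Nat) × String) :=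
  match best with
  | none => some kp
  | some b => if pvKeyLt kp.1 b.1 then some kp else some b

-- Source B's `for i, p in enumerate(available_providers)` loop, carrying (best_key, best)
def pvBest (order : List String) (st : List (String × String)) : Nat → Option ((Nat × Nat) × String) → List String → Option ((Nat × Nat) × String)
  | _, best, [] => best
  | i, best, p :: rest =>
    if ((PySem.Dict.mk st).get? p == some "available") || ((PySem.Dict.mk st).get? p == some "degraded") then
      pvBest order st (i+1)
        (pvTake best ((if ((PySem.Dict.mk st).get? p == some "available") && order.contains p
                       then (0, List.idxOf p order) else (1, i)), p)) rest
    else pvBest order st (i+1) best rest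

def select_route_alt (mode : String) (available_providers : List String) (provider_status : List (String × String)) : String × (List (String × Bool)) :=
  match pvBest (pvOrder mode available_providers) provider_status 0 none available_providers with
  | none => ("none", [("skip_external_rerank", false)])
  | some (_, p) => (p, [("skip_external_rerank", p == "mem0")])

-- ===== PRECONDITION & SPEC =====
def Spec_select_route (mode : String) (available_providers : List String) (provider_status : List (String × String)) (out : String × (List (String × Bool))) : Prop := out = select_route_alt mode available_providers provider_status
instance (mode : String) (available_providers : List String) (provider_status : List (String × String)) (out : String × (List (String × Bool))) : Decidable (Spec_select_route mode available_providers provider_status out) := by unfold Spec_select_route; infer_instance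

-- ===== CLAIM (what is proved, stated in full; the proofs are below) =====
def Claim_equal_select_route : Prop := ∀ (mode : String) (available_providers : List String) (provider_status : List (String × String)), Dom_select_route mode available_providers provider_status → Spec_select_route mode available_providers provider_status (select_route mode available_providers provider_status)

-- ===== LEMMAS AND PROOFS =====

-- intermediate "two find? passes" form both ports are reduced to
def pvFindForm (mode : String) (available_providers : List String) (provider_status : List (String × String)) : String × (List (String × Bool)) :=
  match (pvOrder mode available_providers).find?
      (fun p => available_providers.contains p && ((PySem.Dict.mk provider_status).get? p == some "available")) with
  | some p => (p, [("skip_external_rerank", p == "mem0")])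
  | none =>
    match available_providers.find?
        (fun p => ((PySem.Dict.mk provider_status).get? p == some "available") ||
                  ((PySem.Dict.mk provider_status).get? p == some "degraded")) with
    | some p => (p, [("skip_external_rerank", p == "mem0")])
    | none => ("none", [("skip_external_rerank", false)])

-- ---- A-side reduction to pvFindForm ----
theorem pv_cond_eq (p : String) (av : List String) (st : List (String × String)) :
    (pvEligible p av st && ((PySem.Dict.mk st).getD p "available" == "available")) =
    (av.contains p && ((PySem.Dict.mk st).get? p == some "available")) := by
  unfold pvEligible
  cases hc : av.contains p <;> simp
  cases hg : (PySem.Dict.mk st).get? p with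
  | none => simp [PySem.Dict.getD_of_get?_eq_none _ _ hg]
  | some v =>
    simp [PySem.Dict.getD_of_get?_eq_some _ _ hg]
    by_cases hv : v = "available" <;> simp [hv]

theorem pv_fb_cond_eq (p : String) (av : List String) (st : List (String × String)) :
    pvEligible p av st =
    (av.contains p && (((PySem.Dict.mk st).get? p == some "available") ||
                       ((PySem.Dict.mk st).get? p == some "degraded"))) := by
  unfold pvEligible
  cases hc : av.contains p <;> simp
  cases hg : (PySem.Dict.mk st).get? p with
  | none => simp [PySem.Dict.getD_of_get?_eq_none _ _ hg]
  | some v =>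
    simp [PySem.Dict.getD_of_get?_eq_some _ _ hg]
    by_cases h1 : v = "available" <;> by_cases h2 : v = "degraded" <;> simp [h1, h2]

theorem pvLoopFast_eq_find (av : List String) (st : List (String × String)) (cands : List String) :
    pvLoopFast av st cands =
    (cands.find? (fun p => av.contains p && ((PySem.Dict.mk st).get? p == some "available"))).map
      (fun p => (p, [("skip_external_rerank", p == "mem0")])) := by
  induction cands with
  | nil => rfl
  | cons p rest ih =>
    rw [pvLoopFast, List.find?_cons]
    have h : (av.contains p && pvEligible p av st &&
        ((PySem.Dict.mk st).getD p "available" == "available")) =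
        (av.contains p && ((PySem.Dict.mk st).get? p == some "available")) := by
      rw [Bool.and_assoc, pv_cond_eq, ← Bool.and_assoc, Bool.and_self]
    rw [h]
    cases hcond : (av.contains p && ((PySem.Dict.mk st).get? p == some "available")) <;>
      simp [ih]

theorem pvLoopAcc_eq_find (av : List String) (st : List (String × String)) (cands : List String)
    (hsub : ∀ p ∈ cands, av.contains p = true) :
    pvLoopAcc av st cands =
    (cands.find? (fun p => av.contains p && ((PySem.Dict.mk st).get? p == some "available"))).map
      (fun p => (p, [("skip_external_rerank", p == "mem0")])) := by
  induction cands with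
  | nil => rfl
  | cons p rest ih =>
    have hp : av.contains p = true := hsub p (by simp)
    rw [pvLoopAcc, List.find?_cons]
    have h := pv_cond_eq p av st
    rw [h, hp]
    simp only [Bool.true_and]
    cases hcond : ((PySem.Dict.mk st).get? p == some "available") <;>
      simp [ih (fun q hq => hsub q (by simp [hq]))]

theorem pvLoopFb_eq_find (av : List String) (st : List (String × String)) (cands : List String)
    (hsub : ∀ p ∈ cands, av.contains p = true) :
    pvLoopFb av st cands =
    (cands.find? (fun p => ((PySem.Dict.mk st).get? p == some "available") ||
                           ((PySem.Dict.mk st).get? p == some "degraded"))).map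
      (fun p => (p, [("skip_external_rerank", p == "mem0")])) := by
  induction cands with
  | nil => rfl
  | cons p rest ih =>
    have hp : av.contains p = true := hsub p (by simp)
    rw [pvLoopFb, List.find?_cons, pv_fb_cond_eq p av st, hp]
    simp only [Bool.true_and]
    cases hcond : (((PySem.Dict.mk st).get? p == some "available") ||
                   ((PySem.Dict.mk st).get? p == some "degraded")) <;>
      simp [ih (fun q hq => hsub q (by simp [hq]))]

theorem pvA_eq_findForm (mode : String) (av : List String) (st : List (String × String)) :
    select_route mode av st = pvFindForm mode av st := by
  unfold select_route pvFindForm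
  by_cases hav : av = []
  · subst hav
    simp only [List.isEmpty_nil, if_true]
    have hfind : (pvOrder mode []).find?
        (fun p => ([] : List String).contains p && ((PySem.Dict.mk st).get? p == some "available")) = none :=
      List.find?_eq_none.2 (fun x _ => by simp)
    rw [hfind]
    simp [List.find?]
  · have hne : av.isEmpty = false := by simpa [List.isEmpty_iff] using hav
    simp only [hne, Bool.false_eq_true, if_false]
    rw [pvLoopFb_eq_find av st av (fun p hp => by simpa using hp)]
    have hsubacc : ∀ p ∈ av, av.contains p = true := fun p hp => by simpa using hp
    by_cases hm1 : mode = "conversation"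
    · subst hm1
      have hcand : pvOrder "conversation" av = ["mem0", "supabase"] := by
        simp [pvOrder, PySem.Dict.get?_mk_cons, PySem.Dict.getD_eq_get?_getD]
      rw [hcand]
      simp only [beq_self_eq_true, if_true]
      have h1 : (av.contains "mem0" && pvEligible "mem0" av st &&
          ((PySem.Dict.mk st).getD "mem0" "available" == "available")) =
          (av.contains "mem0" && ((PySem.Dict.mk st).get? "mem0" == some "available")) := by
        rw [Bool.and_assoc, pv_cond_eq, ← Bool.and_assoc, Bool.and_self]
      have h2 : (av.contains "supabase" && pvEligible "supabase" av st &&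
          ((PySem.Dict.mk st).getD "supabase" "available" == "available")) =
          (av.contains "supabase" && ((PySem.Dict.mk st).get? "supabase" == some "available")) := by
        rw [Bool.and_assoc, pv_cond_eq, ← Bool.and_assoc, Bool.and_self]
      rw [h1, h2]
      cases hc1 : (av.contains "mem0" && ((PySem.Dict.mk st).get? "mem0" == some "available")) <;>
        cases hc2 : (av.contains "supabase" && ((PySem.Dict.mk st).get? "supabase" == some "available")) <;>
        simp only [hc1, hc2, List.find?_cons, List.find?_nil, if_true, Bool.false_eq_true, if_false] <;>
        cases List.find? (fun p => ((PySem.Dict.mk st).get? p == some "available") ||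
          ((PySem.Dict.mk st).get? p == some "degraded")) av <;>
        simp
    · by_cases hm2 : mode = "fast"
      · subst hm2
        have hcand : pvOrder "fast" av = ["mem0", "supabase", "graphiti"] := by
          simp [pvOrder, PySem.Dict.get?_mk_cons, PySem.Dict.getD_eq_get?_getD]
        rw [hcand]
        simp only [show ("fast" == "conversation") = false from rfl, beq_self_eq_true,
          Bool.false_eq_true, if_false, if_true]
        rw [pvLoopFast_eq_find]
        cases List.find? (fun p => av.contains p && ((PySem.Dict.mk st).get? p == some "available"))
            ["mem0", "supabase", "graphiti"] <;>
          cases List.find? (fun p => ((PySem.Dict.mk st).get? p == some "available") ||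
            ((PySem.Dict.mk st).get? p == some "degraded")) av <;> simp
      · by_cases hm3 : mode = "accurate"
        · subst hm3
          have hcand : pvOrder "accurate" av = av := by
            simp [pvOrder, PySem.Dict.get?_mk_cons, PySem.Dict.getD_eq_get?_getD]
          rw [hcand]
          simp only [show ("accurate" == "conversation") = false from rfl,
            show ("accurate" == "fast") = false from rfl, beq_self_eq_true,
            Bool.false_eq_true, if_false, if_true]
          rw [pvLoopAcc_eq_find av st av hsubacc]
          cases List.find? (fun p => av.contains p && ((PySem.Dict.mk st).get? p == some "available")) av <;>
            cases List.find? (fun p => ((PySem.Dict.mk st).get? p == some "available") ||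
              ((PySem.Dict.mk st).get? p == some "degraded")) av <;> simp
        · have hb1 : ("conversation" == mode) = false := beq_eq_false_iff_ne.2 (fun h => hm1 h.symm)
          have hb2 : ("fast" == mode) = false := beq_eq_false_iff_ne.2 (fun h => hm2 h.symm)
          have hb3 : ("accurate" == mode) = false := beq_eq_false_iff_ne.2 (fun h => hm3 h.symm)
          have hcand : pvOrder mode av = [] := by
            simp [pvOrder, PySem.Dict.getD_eq_get?_getD, hb1, hb2, hb3, PySem.Dict.get?]
          rw [hcand]
          simp only [show (mode == "conversation") = false from beq_eq_false_iff_ne.2 hm1,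
            show (mode == "fast") = false from beq_eq_false_iff_ne.2 hm2,
            show (mode == "accurate") = false from beq_eq_false_iff_ne.2 hm3,
            Bool.false_eq_true, if_false, List.find?_nil]
          cases List.find? (fun p => ((PySem.Dict.mk st).get? p == some "available") ||
            ((PySem.Dict.mk st).get? p == some "degraded")) av <;> simp

-- ---- B-side: the argmin fold computes the two find? passes ----

-- generic form of pvBest over abstract availability/degradation tests
def pvBestG (a d : String → Bool) (order : List String) : Nat → Option ((Nat × Nat) × String) → List String → Option ((Nat × Nat) × String)
  | _, best, [] => best
  | i, best, p :: rest =>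
    if a p || d p then
      pvBestG a d order (i+1)
        (pvTake best ((if a p && order.contains p then (0, List.idxOf p order) else (1, i)), p)) rest
    else pvBestG a d order (i+1) best rest

theorem pvBest_eq_G (order : List String) (st : List (String × String)) :
    ∀ (l : List String) (i : Nat) (best : Option ((Nat × Nat) × String)),
    pvBest order st i best l =
    pvBestG (fun q => (PySem.Dict.mk st).get? q == some "available")
            (fun q => (PySem.Dict.mk st).get? q == some "degraded") order i best l := by
  intro l
  induction l with
  | nil => intro i best; rfl
  | cons p rest ih => intro i best; rw [pvBest, pvBestG]; split <;> rw [ih]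

-- left-biased lexicographic minimum on optional keyed entries
def pvMinO (x y : Option ((Nat × Nat) × String)) : Option ((Nat × Nat) × String) :=
  match x with
  | none => y
  | some b => match y with
    | none => some b
    | some c => if pvKeyLt c.1 b.1 then some c else some b

theorem pvTake_eq_minO (best : Option ((Nat × Nat) × String)) (kp : (Nat × Nat) × String) :
    pvTake best kp = pvMinO best (some kp) := by
  cases best <;> rfl

theorem pvMinO_none_right (x : Option ((Nat × Nat) × String)) : pvMinO x none = x := by
  cases x <;> rfl

theorem pvMinO_assoc (x y z : Option ((Nat × Nat) × String)) :
    pvMinO (pvMinO x y) z = pvMinO x (pvMinO y z) := by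
  rcases x with _ | b <;> rcases y with _ | c <;> rcases z with _ | e <;>
    first | rfl | (rw [pvMinO_none_right, pvMinO_none_right]) | skip
  by_cases h1 : pvKeyLt c.1 b.1 <;> by_cases h2 : pvKeyLt e.1 c.1 <;> by_cases h3 : pvKeyLt e.1 b.1 <;>
    simp only [pvMinO, h1, h2, h3, if_true, if_false, Bool.false_eq_true] <;>
    first
      | rfl
      | (exfalso; revert h1 h2 h3; simp only [pvKeyLt, decide_eq_true_eq]; omega)

theorem pvBestG_minO (a d : String → Bool) (order : List String) :
    ∀ (l : List String) (i : Nat) (best : Option ((Nat × Nat) × String)),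
    pvBestG a d order i best l = pvMinO best (pvBestG a d order i none l) := by
  intro l
  induction l with
  | nil => intro i best; cases best <;> rfl
  | cons p rest ih =>
    intro i best
    rw [pvBestG, pvBestG]
    split
    · rw [pvTake_eq_minO, pvTake_eq_minO, ih _ (pvMinO best _), ih _ (pvMinO none _), pvMinO_assoc]
      rfl
    · rw [ih _ best]

theorem pv_find?_congr (f g : String → Bool) :
    ∀ (l : List String), (∀ x ∈ l, f x = g x) → l.find? f = l.find? g := by
  intro l
  induction l with
  | nil => intro _; rfl
  | cons x t ih =>
    intro h
    rw [List.find?_cons, List.find?_cons, h x (by simp)]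
    cases g x
    · exact ih (fun y hy => h y (by simp [hy]))
    · rfl

theorem pv_idxOf_inj {v w : String} {order : List String}
    (hv : v ∈ order)
    (h : List.idxOf v order = List.idxOf w order) : v = w := by
  exact (List.idxOf_inj hv).mp h

-- find? returns the predicate-satisfying element of minimal idxOf
theorem pv_find_min (pred : String → Bool) :
    ∀ (order : List String) (v : String), order.find? pred = some v →
    v ∈ order ∧ pred v = true ∧ ∀ w ∈ order, pred w = true → List.idxOf v order ≤ List.idxOf w order := by
  intro order
  induction order with
  | nil => intro v h; simp at h
  | cons x t ih =>
    intro v h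
    rw [List.find?_cons] at h
    cases hx : pred x
    · rw [hx] at h
      obtain ⟨hv, hpv, hmin⟩ := ih v h
      have hvx : v ≠ x := fun he => by rw [he, hx] at hpv; exact Bool.false_ne_true hpv
      refine ⟨by simp [hv], hpv, ?_⟩
      intro w hw hpw
      have hwx : w ≠ x := fun he => by rw [he, hx] at hpw; exact Bool.false_ne_true hpw
      have hw' : w ∈ t := by rcases List.mem_cons.mp hw with h' | h'; exact absurd h' hwx; exact h'
      rw [List.idxOf_cons, List.idxOf_cons]
      have hbx : (x == v) = false := beq_eq_false_iff_ne.2 (fun he => hvx he.symm)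
      have hbw : (x == w) = false := beq_eq_false_iff_ne.2 (fun he => hwx he.symm)
      simp only [hbx, hbw, cond_false]
      exact Nat.succ_le_succ (hmin w hw' hpw)
    · rw [hx] at h
      injection h with h
      subst h
      refine ⟨by simp, hx, ?_⟩
      intro w _ _
      rw [List.idxOf_cons]
      simp

-- the main invariant of the argmin loop
theorem pvBestG_spec (a d : String → Bool) (order : List String) :
    ∀ (l : List String) (i : Nat),
    match order.find? (fun q => l.contains q && a q), l.find? (fun q => a q || d q) with
    | some q, _ => pvBestG a d order i none l = some ((0, List.idxOf q order), q)
    | none, some p => ∃ j, i ≤ j ∧ pvBestG a d order i none l = some ((1, j), p)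
    | none, none => pvBestG a d order i none l = none := by
  intro l
  induction l with
  | nil =>
    intro i
    have h1 : order.find? (fun q => ([] : List String).contains q && a q) = none :=
      List.find?_eq_none.2 (fun x _ => by simp)
    rw [h1, List.find?_nil]
    rfl
  | cons p rest ih =>
    intro i
    have hstep : ∀ (kp : (Nat × Nat) × String), pvBestG a d order (i+1) (some kp) rest
        = pvMinO (some kp) (pvBestG a d order (i+1) none rest) :=
      fun kp => pvBestG_minO a d order rest (i+1) (some kp)
    by_cases hap : a p
    · by_cases hcp : order.contains p
      · -- phase-0 head
        have hpo : p ∈ order := List.contains_iff_mem.mp hcp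
        have hPp : ((p :: rest).contains p && a p) = true := by simp [hap]
        rcases hfP : order.find? (fun q => (p :: rest).contains q && a q) with _ | v
        · exact absurd hPp (by simpa using List.find?_eq_none.1 hfP p hpo)
        · obtain ⟨hvmem, hvP, hvmin⟩ := pv_find_min _ order v hfP
          have hvsplit : v = p ∨ (rest.contains v && a v) = true := by
            have hv2 : (p :: rest).contains v = true ∧ a v = true := by
              constructor
              · cases hc : (p :: rest).contains v
                · rw [hc] at hvP; exact absurd hvP (by simp)
                · rfl
              · cases ha2 : a v
                · rw [ha2] at hvP; exact absurd hvP (by simp)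
                · rfl
            rcases List.mem_cons.mp (List.contains_iff_mem.mp hv2.1) with h' | h'
            · exact Or.inl h'
            · exact Or.inr (by rw [List.contains_iff_mem.mpr h', hv2.2]; rfl)
          have hvp_le : List.idxOf v order ≤ List.idxOf p order := hvmin p hpo hPp
          show pvBestG a d order i none (p :: rest) = some ((0, List.idxOf v order), v)
          rw [pvBestG]
          simp only [hap, hcp, Bool.true_or, Bool.and_self, if_true, pvTake]
          rw [hstep]
          rcases hfPr : order.find? (fun q => rest.contains q && a q) with _ | q
          · have hvp : v = p := by
              rcases hvsplit with h' | h'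
              · exact h'
              · exact absurd h' (by simpa using List.find?_eq_none.1 hfPr v hvmem)
            subst hvp
            have hIH := ih (i+1)
            rw [hfPr] at hIH
            rcases hfbr : rest.find? (fun q => a q || d q) with _ | q2
            · rw [hfbr] at hIH
              rw [hIH]
              rfl
            · rw [hfbr] at hIH
              obtain ⟨j, hij, hb⟩ := hIH
              rw [hb]
              have hk : pvKeyLt (1, j) (0, List.idxOf v order) = false := by
                simp [pvKeyLt]
              simp [pvMinO, hk]
          · obtain ⟨hqmem, hqPr, hqmin⟩ := pv_find_min _ order q hfPr
            have hq2 : rest.contains q = true ∧ a q = true := by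
              constructor
              · cases hc : rest.contains q
                · rw [hc] at hqPr; exact absurd hqPr (by simp)
                · rfl
              · cases ha2 : a q
                · rw [ha2] at hqPr; exact absurd hqPr (by simp)
                · rfl
            have hqP : ((p :: rest).contains q && a q) = true := by
              rw [List.contains_iff_mem.mpr (List.mem_cons_of_mem p (List.contains_iff_mem.mp hq2.1)), hq2.2]
              rfl
            have hvq_le : List.idxOf v order ≤ List.idxOf q order := hvmin q hqmem hqP
            have hIH := ih (i+1)
            rw [hfPr] at hIH
            rw [hIH]
            by_cases hlt : List.idxOf q order < List.idxOf p order
            · have hk : pvKeyLt (0, List.idxOf q order) (0, List.idxOf p order) = true := by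
                simp [pvKeyLt]; omega
              simp only [pvMinO, hk, if_true]
              have hvq : v = q := by
                rcases hvsplit with h' | h'
                · exfalso; rw [h'] at hvq_le; omega
                · exact pv_idxOf_inj hvmem (Nat.le_antisymm hvq_le (hqmin v hvmem h'))
              rw [hvq]
            · have hk : pvKeyLt (0, List.idxOf q order) (0, List.idxOf p order) = false := by
                simp [pvKeyLt]; omega
              simp only [pvMinO, hk, Bool.false_eq_true, if_false]
              have hvp : v = p := by
                rcases hvsplit with h' | h'
                · exact h'
                · have h1 := hqmin v hvmem h'
                  have h2 : List.idxOf p order ≤ List.idxOf q order := Nat.le_of_not_lt hlt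
                  have hvq : v = q := pv_idxOf_inj hvmem (Nat.le_antisymm (Nat.le_trans hvp_le h2) h1)
                  have hpq : p = q := pv_idxOf_inj hpo (Nat.le_antisymm h2 (by omega))
                  rw [hvq, hpq]
              rw [hvp]
      · -- head available but not in order: fallback key (1, i)
        have hcp' : order.contains p = false := Bool.eq_false_iff.mpr hcp
        have hcong : order.find? (fun q => (p :: rest).contains q && a q)
            = order.find? (fun q => rest.contains q && a q) := by
          apply pv_find?_congr
          intro x hx
          by_cases hxp : x = p
          · exact absurd (List.contains_iff_mem.mpr (hxp ▸ hx)) hcp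
          · rw [List.contains_cons, beq_eq_false_iff_ne.2 hxp, Bool.false_or]
        have hfbp : (a p || d p) = true := by rw [hap]; rfl
        have hfs : (p :: rest).find? (fun q => a q || d q) = some p := by
          rw [List.find?_cons]; rw [hfbp]
        have hkey : (a p && order.contains p) = false := by rw [hap, hcp']; rfl
        rw [hcong, hfs]
        rcases hfPr : order.find? (fun q => rest.contains q && a q) with _ | q
        · show ∃ j, i ≤ j ∧ pvBestG a d order i none (p :: rest) = some ((1, j), p)
          rw [pvBestG]
          simp only [hfbp, if_true, hkey, Bool.false_eq_true, if_false, pvTake]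
          rw [hstep]
          have hIH := ih (i+1)
          rw [hfPr] at hIH
          rcases hfbr : rest.find? (fun q => a q || d q) with _ | q2
          · rw [hfbr] at hIH
            rw [hIH]
            exact ⟨i, Nat.le_refl i, rfl⟩
          · rw [hfbr] at hIH
            obtain ⟨j, hij, hb⟩ := hIH
            rw [hb]
            have hk : pvKeyLt (1, j) (1, i) = false := by
              simp [pvKeyLt]; omega
            simp only [pvMinO, hk, Bool.false_eq_true, if_false]
            exact ⟨i, Nat.le_refl i, rfl⟩
        · show pvBestG a d order i none (p :: rest) = some ((0, List.idxOf q order), q)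
          rw [pvBestG]
          simp only [hfbp, if_true, hkey, Bool.false_eq_true, if_false, pvTake]
          rw [hstep]
          have hIH := ih (i+1)
          rw [hfPr] at hIH
          rw [hIH]
          have hk : pvKeyLt (0, List.idxOf q order) (1, i) = true := by
            simp [pvKeyLt]
          simp [pvMinO, hk]
    · have hap' : a p = false := Bool.eq_false_iff.mpr hap
      have hcong : order.find? (fun q => (p :: rest).contains q && a q)
          = order.find? (fun q => rest.contains q && a q) := by
        apply pv_find?_congr
        intro x hx
        by_cases hxp : x = p
        · subst hxp; rw [hap', Bool.and_false, Bool.and_false]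
        · rw [List.contains_cons, beq_eq_false_iff_ne.2 hxp, Bool.false_or]
      rw [hcong]
      by_cases hdp : d p
      · -- degraded head: fallback key (1, i)
        have hfbp : (a p || d p) = true := by rw [hap', hdp]; rfl
        have hfs : (p :: rest).find? (fun q => a q || d q) = some p := by
          rw [List.find?_cons]; rw [hfbp]
        have hkey : (a p && order.contains p) = false := by rw [hap']; rfl
        rw [hfs]
        rcases hfPr : order.find? (fun q => rest.contains q && a q) with _ | q
        · show ∃ j, i ≤ j ∧ pvBestG a d order i none (p :: rest) = some ((1, j), p)
          rw [pvBestG]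
          simp only [hfbp, if_true, hkey, Bool.false_eq_true, if_false, pvTake]
          rw [hstep]
          have hIH := ih (i+1)
          rw [hfPr] at hIH
          rcases hfbr : rest.find? (fun q => a q || d q) with _ | q2
          · rw [hfbr] at hIH
            rw [hIH]
            exact ⟨i, Nat.le_refl i, rfl⟩
          · rw [hfbr] at hIH
            obtain ⟨j, hij, hb⟩ := hIH
            rw [hb]
            have hk : pvKeyLt (1, j) (1, i) = false := by
              simp [pvKeyLt]; omega
            simp only [pvMinO, hk, Bool.false_eq_true, if_false]
            exact ⟨i, Nat.le_refl i, rfl⟩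
        · show pvBestG a d order i none (p :: rest) = some ((0, List.idxOf q order), q)
          rw [pvBestG]
          simp only [hfbp, if_true, hkey, Bool.false_eq_true, if_false, pvTake]
          rw [hstep]
          have hIH := ih (i+1)
          rw [hfPr] at hIH
          rw [hIH]
          have hk : pvKeyLt (0, List.idxOf q order) (1, i) = true := by
            simp [pvKeyLt]
          simp [pvMinO, hk]
      · -- ineligible head: skipped
        have hdp' : d p = false := Bool.eq_false_iff.mpr hdp
        have hfbp : (a p || d p) = false := by rw [hap', hdp']; rfl
        have hfs : (p :: rest).find? (fun q => a q || d q) = rest.find? (fun q => a q || d q) := by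
          rw [List.find?_cons]; rw [hfbp]
        have hrec : pvBestG a d order i none (p :: rest) = pvBestG a d order (i+1) none rest := by
          rw [pvBestG]
          simp only [hfbp, Bool.false_eq_true, if_false]
        rw [hfs, hrec]
        have hIH := ih (i+1)
        rcases hfPr : order.find? (fun q => rest.contains q && a q) with _ | q
        · rw [hfPr] at hIH
          rcases hfbr : rest.find? (fun q => a q || d q) with _ | q2
          · rw [hfbr] at hIH
            exact hIH
          · rw [hfbr] at hIH
            obtain ⟨j, hij, hb⟩ := hIH
            exact ⟨j, Nat.le_trans (Nat.le_succ i) hij, hb⟩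
        · rw [hfPr] at hIH
          exact hIH

theorem pvB_eq_findForm (mode : String) (av : List String) (st : List (String × String)) :
    select_route_alt mode av st = pvFindForm mode av st := by
  unfold select_route_alt pvFindForm
  rw [pvBest_eq_G]
  have h := pvBestG_spec (fun q => (PySem.Dict.mk st).get? q == some "available")
    (fun q => (PySem.Dict.mk st).get? q == some "degraded") (pvOrder mode av) av 0
  cases hf1 : (pvOrder mode av).find? (fun p => av.contains p && ((PySem.Dict.mk st).get? p == some "available")) with
  | some q =>
    rw [hf1] at h
    rw [h]
  | none =>
    rw [hf1] at h
    cases hf2 : av.find? (fun p => ((PySem.Dict.mk st).get? p == some "available") ||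
        ((PySem.Dict.mk st).get? p == some "degraded")) with
    | some p =>
      rw [hf2] at h
      obtain ⟨j, _, hb⟩ := h
      rw [hb]
    | none =>
      rw [hf2] at h
      rw [h]

-- ===== VERDICT (by name: the statement is the Claim_ definition above) =====
theorem select_route_spec : Claim_equal_select_route := by
  intro mode av st _
  unfold Spec_select_route
  rw [pvA_eq_findForm, pvB_eq_findForm]
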